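-- pv_equiv track=rewrite | github.com/miray-mustafov/Telerik | PythonCore/Coding Tasks II/3. Bounce.py | bounce
-- ===== SOURCE A (Python) =====
-- def bounce(N, M):
--     matrix = [[2 ** (i + j) for j in range(M)] for i in range(N)]
--     total = 0
--     r, c = 0, 0
--     dir_r, dir_c = 1, 1
--     while 0 <= r < N and 0 <= c < M:
--         total += matrix[r][c]
--         if r + dir_r < 0 or r + dir_r >= N:
--             dir_r *= -1
--         elif c + dir_c < 0 or c + dir_c >= M:
--             dir_c *= -1
--         r += dir_r
--         c += dir_c
--     return total
-- ===== SOURCE B (Python) =====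
-- def bounce(N, M):
--     total = 0
--     r, c = 0, 0
--     dir_r, dir_c = 1, 1
--     while 0 <= r < N and 0 <= c < M:
--         # length of the straight diagonal segment starting here (k extra cells)
--         kr = N - 1 - r if dir_r == 1 else r
--         kc = M - 1 - c if dir_c == 1 else c
--         k = kr if kr < kc else kc
--         s = dir_r + dir_c
--         if s == 0:
--             total += (2 ** (r + c)) * (k + 1)
--         elif s == 2:
--             total += (2 ** (r + c)) * (4 ** (k + 1) - 1) // 3
--         else:
--             total += (2 ** (r + c - 2 * k)) * (4 ** (k + 1) - 1) // 3
--         r += dir_r * k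
--         c += dir_c * k
--         # bounce (same reflection rule as the spec: row wall first, else column wall)
--         if r + dir_r < 0 or r + dir_r >= N:
--             dir_r = -dir_r
--         elif c + dir_c < 0 or c + dir_c >= M:
--             dir_c = -dir_c
--         r += dir_r
--         c += dir_c
--     return total
-- ===== Notes on version B (the rewrite author's own statement) =====
-- stated objective: faster
-- what changed: B drops A's precomputed N*M matrix of 2^(i+j) and walks the bounce path one whole diagonal segment at a time, adding each segment's power sum in closed form (geometric series of ratio 4), instead of visiting every cell.
import Mathlib
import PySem

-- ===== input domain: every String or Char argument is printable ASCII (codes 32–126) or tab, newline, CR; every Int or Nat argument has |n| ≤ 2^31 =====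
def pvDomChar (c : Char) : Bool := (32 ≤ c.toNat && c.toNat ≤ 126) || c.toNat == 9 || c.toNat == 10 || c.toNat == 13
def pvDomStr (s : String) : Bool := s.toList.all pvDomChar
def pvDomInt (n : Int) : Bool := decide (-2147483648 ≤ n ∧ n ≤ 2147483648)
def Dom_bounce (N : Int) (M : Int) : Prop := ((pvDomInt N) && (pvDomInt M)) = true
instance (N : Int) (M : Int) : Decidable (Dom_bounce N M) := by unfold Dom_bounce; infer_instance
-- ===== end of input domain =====

-- B replaces A's precomputed 2^(i+j) matrix and cell-by-cell walk by a walk over whole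
-- diagonal segments between bounces, summing each segment's powers in closed form (objective: faster).

-- ===== PORT A =====
-- matrix = [[2 ** (i + j) for j in range(M)] for i in range(N)]   (i+j ≥ 0 on range elements; .toNat exact there)
def bounceMat (N M : Int) : List (List Int) :=
  (PySem.List.pyRange 0 N 1).map (fun i => (PySem.List.pyRange 0 M 1).map (fun j => 2 ^ (i + j).toNat))

-- the while loop; fuel only makes the recursion total (the Python loop ends within N*M+1 iterations,
-- the fuel the top-level call supplies; the 0-fuel branch is unreachable from there).
-- matrix[r][c] is ported with default 0: the loop guard keeps r, c in range, where pyGetD = Python indexing.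
def bounceLoopA (N M : Int) (mat : List (List Int)) (fuel : Nat)
    (total r c dr dc : Int) : Int :=
  if 0 ≤ r ∧ r < N ∧ 0 ≤ c ∧ c < M then
    match fuel with
    | 0 => 0
    | fuel' + 1 =>
      bounceLoopA N M mat fuel'
        (total + PySem.List.pyGetD (PySem.List.pyGetD mat r []) c 0)
        (r + (if r + dr < 0 ∨ N ≤ r + dr then -dr else dr))
        (c + (if ¬(r + dr < 0 ∨ N ≤ r + dr) ∧ (c + dc < 0 ∨ M ≤ c + dc) then -dc else dc))
        (if r + dr < 0 ∨ N ≤ r + dr then -dr else dr)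
        (if ¬(r + dr < 0 ∨ N ≤ r + dr) ∧ (c + dc < 0 ∨ M ≤ c + dc) then -dc else dc)
  else total

def bounce (N : Int) (M : Int) : Int :=
  bounceLoopA N M (bounceMat N M) (N.toNat * M.toNat + 1) 0 0 0 1 1

-- ===== PORT B =====
-- per-segment loop of Source B.  Totality device only (the Python loop has none): rem counts remaining
-- path cells exactly like A's fuel; g bounds the number of segments (each segment spends at least one
-- cell of rem, so rem ≤ g keeps the g = 0 branch unreachable); the recursion is structural on g.
-- Python's '//' is PySem.Int.floordiv; exponents are ≥ 0 wherever taken, so .toNat is exact.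
def bounceLoopB (N M : Int) : Nat → Nat → Int → Int → Int → Int → Int → Int
  | g, rem, total, r, c, dr, dc =>
    if 0 ≤ r ∧ r < N ∧ 0 ≤ c ∧ c < M then
      let kr := if dr = 1 then N - 1 - r else r
      let kc := if dc = 1 then M - 1 - c else c
      let k := if kr < kc then kr else kc
      if rem < k.toNat + 1 then 0
      else
        match g with
        | 0 => 0
        | g + 1 =>
          let total :=
            if dr + dc = 0 then total + 2 ^ (r + c).toNat * (k + 1)
            else if dr + dc = 2 then
              total + PySem.Int.floordiv (2 ^ (r + c).toNat * (4 ^ (k + 1).toNat - 1)) 3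
            else
              total + PySem.Int.floordiv (2 ^ (r + c - 2 * k).toNat * (4 ^ (k + 1).toNat - 1)) 3
          let r' := r + dr * k
          let c' := c + dc * k
          let dr' := if r' + dr < 0 ∨ N ≤ r' + dr then -dr else dr
          let dc' := if ¬(r' + dr < 0 ∨ N ≤ r' + dr) ∧ (c' + dc < 0 ∨ M ≤ c' + dc) then -dc else dc
          bounceLoopB N M g (rem - (k.toNat + 1)) total (r' + dr') (c' + dc') dr' dc'
    else total

def bounce_alt (N : Int) (M : Int) : Int :=
  bounceLoopB N M (N.toNat * M.toNat + 1) (N.toNat * M.toNat + 1) 0 0 0 1 1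

-- ===== PRECONDITION & SPEC =====
def Spec_bounce (N : Int) (M : Int) (out : Int) : Prop := out = bounce_alt N M
instance (N : Int) (M : Int) (out : Int) : Decidable (Spec_bounce N M out) := by unfold Spec_bounce; infer_instance

-- ===== CLAIM (what is proved, stated in full; the proofs are below) =====
def Claim_equal_bounce : Prop := ∀ (N : Int) (M : Int), Dom_bounce N M → Spec_bounce N M (bounce N M)

-- ===== LEMMAS AND PROOFS =====

-- sum of the powers 2^(r+c), 2^((r+dr)+(c+dc)), … along j straight diagonal steps
def segSum (r c dr dc : Int) : Nat → Int
  | 0 => 0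
  | j + 1 => 2 ^ (r + c).toNat + segSum (r + dr) (c + dc) dr dc j

lemma segSum_succ_right (dr dc : Int) (j : Nat) : ∀ r c : Int,
    segSum r c dr dc (j + 1) = segSum r c dr dc j + 2 ^ ((r + dr * j) + (c + dc * j)).toNat := by
  induction j with
  | zero => intro r c; simp [segSum]
  | succ j ih =>
      intro r c
      have h1 : segSum r c dr dc (j + 1 + 1) = 2 ^ (r + c).toNat + segSum (r + dr) (c + dc) dr dc (j + 1) := rfl
      have h2 : segSum r c dr dc (j + 1) = 2 ^ (r + c).toNat + segSum (r + dr) (c + dc) dr dc j := rfl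
      rw [h1, h2, ih (r + dr) (c + dc), ← add_assoc, ← add_assoc]
      congr 3
      push_cast
      ring

lemma mat_get (N M r c : Int) (h0 : 0 ≤ r) (h1 : r < N) (h2 : 0 ≤ c) (h3 : c < M) :
    PySem.List.pyGetD (PySem.List.pyGetD (bounceMat N M) r []) c 0 = 2 ^ (r + c).toNat := by
  unfold bounceMat
  rw [PySem.List.pyGetD_map_pyRange_of_nonneg _ N r [] h0 h1,
      PySem.List.pyGetD_map_pyRange_of_nonneg _ M c 0 h2 h3]

-- closed form, constant diagonal (dr + dc = 0)
lemma segSum_cf0 (dr dc : Int) (hs : dr + dc = 0) (j : Nat) : ∀ r c : Int,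
    segSum r c dr dc j = 2 ^ (r + c).toNat * j := by
  induction j with
  | zero => intro r c; simp [segSum]
  | succ j ih =>
      intro r c
      have := ih (r + dr) (c + dc)
      have hrc : r + dr + (c + dc) = r + c := by omega
      simp only [segSum, this, hrc]
      push_cast
      ring

-- closed form, ascending diagonal
lemma segSum_cf2 (j : Nat) : ∀ r c : Int, 0 ≤ r → 0 ≤ c →
    3 * segSum r c 1 1 j = 2 ^ (r + c).toNat * (4 ^ j - 1) := by
  induction j with
  | zero => intro r c _ _; simp [segSum]
  | succ j ih =>
      intro r c hr hc
      have := ih (r + 1) (c + 1) (by omega) (by omega)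
      have hx : (r + 1 + (c + 1)).toNat = (r + c).toNat + 2 := by omega
      simp only [segSum, mul_add, this, hx]
      have h4 : (2:Int) ^ ((r + c).toNat + 2) = 4 * 2 ^ (r + c).toNat := by ring
      rw [h4]; ring

-- closed form, descending diagonal
lemma segSum_cfm2 (j : Nat) : ∀ r c : Int, (j:Int) ≤ r + 1 → (j:Int) ≤ c + 1 →
    3 * segSum r c (-1) (-1) j = 2 ^ (r + c - 2 * j + 2).toNat * (4 ^ j - 1) := by
  induction j with
  | zero => intro r c _ _; simp [segSum]
  | succ j ih =>
      intro r c hr hc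
      have hj : (j:Int) ≤ r ∧ (j:Int) ≤ c := by omega
      have := ih (r + -1) (c + -1) (by omega) (by omega)
      have hx : r + -1 + (c + -1) - 2 * (j:Int) + 2 = r + c - 2 * j := by omega
      simp only [segSum, mul_add, this, hx]
      have hsplit : (r + c).toNat = (r + c - 2 * (j:Int)).toNat + 2 * j := by omega
      have he : r + c - 2 * ((j:Nat) + 1 : Nat) + 2 = r + c - 2 * (j:Int) := by push_cast; omega
      rw [he, hsplit]
      have h2 : (2:Int) ^ ((r + c - 2 * (j:Int)).toNat + 2 * j)
          = 2 ^ (r + c - 2 * (j:Int)).toNat * 4 ^ j := by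
        rw [pow_add]; congr 1
        rw [pow_mul]; norm_num
      rw [h2]
      push_cast
      ring

-- A runs j straight steps (no bounce) from an in-bounds cell, spending j fuel
lemma loopA_straight (N M : Int) (mat : List (List Int))
    (hmat : ∀ r c : Int, 0 ≤ r → r < N → 0 ≤ c → c < M →
      PySem.List.pyGetD (PySem.List.pyGetD mat r []) c 0 = 2 ^ (r + c).toNat) :
    ∀ (j : Nat) (fuel : Nat) (total r c dr dc : Int),
    (dr = 1 ∨ dr = -1) → (dc = 1 ∨ dc = -1) →
    0 ≤ r → r < N → 0 ≤ c → c < M →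
    (dr = 1 → (j:Int) ≤ N - 1 - r) → (dr = -1 → (j:Int) ≤ r) →
    (dc = 1 → (j:Int) ≤ M - 1 - c) → (dc = -1 → (j:Int) ≤ c) →
    bounceLoopA N M mat (j + fuel) total r c dr dc
      = bounceLoopA N M mat fuel (total + segSum r c dr dc j) (r + dr * j) (c + dc * j) dr dc := by
  intro j
  induction j with
  | zero =>
      intro fuel total r c dr dc _ _ _ _ _ _ _ _ _ _
      simp [segSum]
  | succ j ih =>
      intro fuel total r c dr dc hdr hdc hr0 hrN hc0 hcM hb1 hb2 hb3 hb4
      have hin : 0 ≤ r ∧ r < N ∧ 0 ≤ c ∧ c < M := ⟨hr0, hrN, hc0, hcM⟩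
      have hrin : ¬(r + dr < 0 ∨ N ≤ r + dr) := by
        rcases hdr with h | h
        · have := hb1 h; push_cast at this; omega
        · have := hb2 h; push_cast at this; omega
      have hcin : ¬(¬(r + dr < 0 ∨ N ≤ r + dr) ∧ (c + dc < 0 ∨ M ≤ c + dc)) := by
        rcases hdc with h | h
        · have := hb3 h; push_cast at this
          intro hh; rcases hh.2 with h2 | h2 <;> omega
        · have := hb4 h; push_cast at this
          intro hh; rcases hh.2 with h2 | h2 <;> omega
      have hstep : (j + 1) + fuel = (j + fuel) + 1 := by omega
      rw [hstep, bounceLoopA]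
      simp only [if_pos hin, if_neg hrin, if_neg hcin,
        hmat r c hr0 hrN hc0 hcM]
      rw [ih fuel (total + 2 ^ (r + c).toNat) (r + dr) (c + dc) dr dc hdr hdc
        (by rcases hdr with h | h
            · omega
            · have := hb2 h; push_cast at this; omega)
        (by rcases hdr with h | h
            · have := hb1 h; push_cast at this; omega
            · omega)
        (by rcases hdc with h | h
            · omega
            · have := hb4 h; push_cast at this; omega)
        (by rcases hdc with h | h
            · have := hb3 h; push_cast at this; omega
            · omega)
        (by intro h; have := hb1 h; push_cast at this ⊢; omega)
        (by intro h; have := hb2 h; push_cast at this ⊢; omega)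
        (by intro h; have := hb3 h; push_cast at this ⊢; omega)
        (by intro h; have := hb4 h; push_cast at this ⊢; omega)]
      congr 1
      · simp only [segSum]; ring
      · push_cast; ring
      · push_cast; ring

-- main simulation: for EVERY fuel, the two loops agree
lemma loopA_zero (N M : Int) (mat : List (List Int)) (total r c dr dc : Int)
    (h : 0 ≤ r ∧ r < N ∧ 0 ≤ c ∧ c < M) :
    bounceLoopA N M mat 0 total r c dr dc = 0 := by
  rw [bounceLoopA]; simp only [if_pos h]

lemma loopA_succ (N M : Int) (mat : List (List Int)) (f : Nat) (total r c dr dc : Int)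
    (h : 0 ≤ r ∧ r < N ∧ 0 ≤ c ∧ c < M) :
    bounceLoopA N M mat (f + 1) total r c dr dc
      = bounceLoopA N M mat f
          (total + PySem.List.pyGetD (PySem.List.pyGetD mat r []) c 0)
          (r + (if r + dr < 0 ∨ N ≤ r + dr then -dr else dr))
          (c + (if ¬(r + dr < 0 ∨ N ≤ r + dr) ∧ (c + dc < 0 ∨ M ≤ c + dc) then -dc else dc))
          (if r + dr < 0 ∨ N ≤ r + dr then -dr else dr)
          (if ¬(r + dr < 0 ∨ N ≤ r + dr) ∧ (c + dc < 0 ∨ M ≤ c + dc) then -dc else dc) := by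
  rw [bounceLoopA]; simp only [if_pos h]

lemma loopAB (N M : Int) : ∀ (g rem : Nat) (total r c dr dc : Int), rem ≤ g →
    (dr = 1 ∨ dr = -1) → (dc = 1 ∨ dc = -1) →
    bounceLoopA N M (bounceMat N M) rem total r c dr dc
      = bounceLoopB N M g rem total r c dr dc := by
  intro g
  induction g with
  | zero =>
      intro rem total r c dr dc hle hdr hdc
      obtain rfl := Nat.le_zero.mp hle
      by_cases hin : 0 ≤ r ∧ r < N ∧ 0 ≤ c ∧ c < M
      · rw [loopA_zero N M _ _ _ _ _ _ hin, bounceLoopB]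
        simp only [if_pos hin]
        split_ifs <;> rfl
      · rw [bounceLoopA.eq_def, bounceLoopB, if_neg hin, if_neg hin]
  | succ g ihg =>
  intro rem total r c dr dc hle hdr hdc
  by_cases hin : 0 ≤ r ∧ r < N ∧ 0 ≤ c ∧ c < M
  · obtain ⟨hr0, hrN, hc0, hcM⟩ := hin
    have hin' : 0 ≤ r ∧ r < N ∧ 0 ≤ c ∧ c < M := ⟨hr0, hrN, hc0, hcM⟩
    rw [bounceLoopB]
    simp only [if_pos hin']
    rcases hdr with rfl | rfl <;> rcases hdc with rfl | rfl
    · -- dr = 1, dc = 1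
      simp only [if_true, if_false, eq_self_iff_true, if_neg (show ¬((1:Int) + 1 = 0) from by norm_num), if_pos (show (1:Int) + 1 = 2 from by norm_num)]
      set K : Int := if N - 1 - r < M - 1 - c then N - 1 - r else M - 1 - c with hK
      have hK1 : K ≤ N - 1 - r := by rw [hK]; split_ifs <;> omega
      have hK2 : K ≤ M - 1 - c := by rw [hK]; split_ifs <;> omega
      have hK0 : 0 ≤ K := by rw [hK]; split_ifs <;> omega
      have hKc : ((K.toNat : Int)) = K := Int.toNat_of_nonneg hK0
      by_cases hf : rem < K.toNat + 1
      · rw [if_pos hf]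
        have hA := loopA_straight N M (bounceMat N M) (mat_get N M) rem 0 total r c 1 (1)
          (by norm_num) (by norm_num) hr0 hrN hc0 hcM
          (by intro h; omega) (by intro h; omega) (by intro h; omega) (by intro h; omega)
        rw [Nat.add_zero] at hA
        rw [hA, loopA_zero N M _ _ _ _ _ _ ⟨by omega, by omega, by omega, by omega⟩]
      · rw [if_neg hf]
        have hA := loopA_straight N M (bounceMat N M) (mat_get N M) K.toNat (rem - K.toNat)
          total r c 1 (1) (by norm_num) (by norm_num) hr0 hrN hc0 hcM
          (by intro h; omega) (by intro h; omega) (by intro h; omega) (by intro h; omega)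
        rw [show K.toNat + (rem - K.toNat) = rem from by omega] at hA
        obtain ⟨f2, hf2⟩ : ∃ f2, rem - K.toNat = f2 + 1 := ⟨rem - K.toNat - 1, by omega⟩
        rw [hA, hf2, loopA_succ N M _ _ _ _ _ _ _ ⟨by omega, by omega, by omega, by omega⟩,
            mat_get N M _ _ (by omega) (by omega) (by omega) (by omega),
            ihg f2 _ _ _ _ _ (by omega) (by split_ifs <;> simp) (by split_ifs <;> simp)]
        simp only [hKc, neg_neg]
        rw [show f2 = rem - (K.toNat + 1) from by omega]
        have hsr := segSum_succ_right 1 (1) K.toNat r c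
        simp only [hKc] at hsr
        have hKe : (K + 1).toNat = K.toNat + 1 := by omega
        have hcf := segSum_cf2 (K.toNat + 1) r c hr0 hc0
        have hfd : PySem.Int.floordiv (2 ^ (r + c).toNat * (4 ^ (K + 1).toNat - 1)) 3
            = 2 ^ (r + c).toNat * (4 ^ (K + 1).toNat - 1) / 3 :=
          PySem.Int.floordiv_eq_ediv_of_pos (by norm_num)
        have htot : total + segSum r c 1 1 K.toNat + 2 ^ (r + 1 * K + (c + 1 * K)).toNat
            = total + PySem.Int.floordiv (2 ^ (r + c).toNat * (4 ^ (K + 1).toNat - 1)) 3 := by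
          rw [hfd, add_assoc, ← hsr, hKe, ← hcf, Int.mul_ediv_cancel_left _ (by norm_num)]
        rw [htot]
    · -- dr = 1, dc = -1
      simp only [if_true, if_false, eq_self_iff_true, if_neg (show ¬((-1:Int) = 1) from by norm_num), if_pos (show (1:Int) + -1 = 0 from by norm_num), neg_neg]
      set K : Int := if N - 1 - r < c then N - 1 - r else c with hK
      have hK1 : K ≤ N - 1 - r := by rw [hK]; split_ifs <;> omega
      have hK2 : K ≤ c := by rw [hK]; split_ifs <;> omega
      have hK0 : 0 ≤ K := by rw [hK]; split_ifs <;> omega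
      have hKc : ((K.toNat : Int)) = K := Int.toNat_of_nonneg hK0
      by_cases hf : rem < K.toNat + 1
      · rw [if_pos hf]
        have hA := loopA_straight N M (bounceMat N M) (mat_get N M) rem 0 total r c 1 (-1)
          (by norm_num) (by norm_num) hr0 hrN hc0 hcM
          (by intro h; omega) (by intro h; omega) (by intro h; omega) (by intro h; omega)
        rw [Nat.add_zero] at hA
        rw [hA, loopA_zero N M _ _ _ _ _ _ ⟨by omega, by omega, by omega, by omega⟩]
      · rw [if_neg hf]
        have hA := loopA_straight N M (bounceMat N M) (mat_get N M) K.toNat (rem - K.toNat)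
          total r c 1 (-1) (by norm_num) (by norm_num) hr0 hrN hc0 hcM
          (by intro h; omega) (by intro h; omega) (by intro h; omega) (by intro h; omega)
        rw [show K.toNat + (rem - K.toNat) = rem from by omega] at hA
        obtain ⟨f2, hf2⟩ : ∃ f2, rem - K.toNat = f2 + 1 := ⟨rem - K.toNat - 1, by omega⟩
        rw [hA, hf2, loopA_succ N M _ _ _ _ _ _ _ ⟨by omega, by omega, by omega, by omega⟩,
            mat_get N M _ _ (by omega) (by omega) (by omega) (by omega),
            ihg f2 _ _ _ _ _ (by omega) (by split_ifs <;> simp) (by split_ifs <;> simp)]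
        simp only [hKc, neg_neg]
        rw [show f2 = rem - (K.toNat + 1) from by omega]
        have hsr := segSum_succ_right 1 (-1) K.toNat r c
        simp only [hKc] at hsr
        have hKe : (K + 1).toNat = K.toNat + 1 := by omega
        have hcf := segSum_cf0 1 (-1) (by norm_num) (K.toNat + 1) r c
        have htot : total + segSum r c 1 (-1) K.toNat + 2 ^ (r + 1 * K + (c + -1 * K)).toNat
            = total + 2 ^ (r + c).toNat * (K + 1) := by
          rw [add_assoc, ← hsr, hcf, show (((K.toNat + 1 : Nat)) : Int) = K + 1 from by omega]
        rw [htot]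
    · -- dr = -1, dc = 1
      simp only [if_true, if_false, if_neg (show ¬((-1:Int) = 1) from by norm_num), if_true, if_false, eq_self_iff_true, if_pos (show (-1:Int) + 1 = 0 from by norm_num), neg_neg]
      set K : Int := if r < M - 1 - c then r else M - 1 - c with hK
      have hK1 : K ≤ r := by rw [hK]; split_ifs <;> omega
      have hK2 : K ≤ M - 1 - c := by rw [hK]; split_ifs <;> omega
      have hK0 : 0 ≤ K := by rw [hK]; split_ifs <;> omega
      have hKc : ((K.toNat : Int)) = K := Int.toNat_of_nonneg hK0
      by_cases hf : rem < K.toNat + 1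
      · rw [if_pos hf]
        have hA := loopA_straight N M (bounceMat N M) (mat_get N M) rem 0 total r c (-1) (1)
          (by norm_num) (by norm_num) hr0 hrN hc0 hcM
          (by intro h; omega) (by intro h; omega) (by intro h; omega) (by intro h; omega)
        rw [Nat.add_zero] at hA
        rw [hA, loopA_zero N M _ _ _ _ _ _ ⟨by omega, by omega, by omega, by omega⟩]
      · rw [if_neg hf]
        have hA := loopA_straight N M (bounceMat N M) (mat_get N M) K.toNat (rem - K.toNat)
          total r c (-1) (1) (by norm_num) (by norm_num) hr0 hrN hc0 hcM
          (by intro h; omega) (by intro h; omega) (by intro h; omega) (by intro h; omega)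
        rw [show K.toNat + (rem - K.toNat) = rem from by omega] at hA
        obtain ⟨f2, hf2⟩ : ∃ f2, rem - K.toNat = f2 + 1 := ⟨rem - K.toNat - 1, by omega⟩
        rw [hA, hf2, loopA_succ N M _ _ _ _ _ _ _ ⟨by omega, by omega, by omega, by omega⟩,
            mat_get N M _ _ (by omega) (by omega) (by omega) (by omega),
            ihg f2 _ _ _ _ _ (by omega) (by split_ifs <;> simp) (by split_ifs <;> simp)]
        simp only [hKc, neg_neg]
        rw [show f2 = rem - (K.toNat + 1) from by omega]
        have hsr := segSum_succ_right (-1) 1 K.toNat r c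
        simp only [hKc] at hsr
        have hKe : (K + 1).toNat = K.toNat + 1 := by omega
        have hcf := segSum_cf0 (-1) 1 (by norm_num) (K.toNat + 1) r c
        have htot : total + segSum r c (-1) 1 K.toNat + 2 ^ (r + -1 * K + (c + 1 * K)).toNat
            = total + 2 ^ (r + c).toNat * (K + 1) := by
          rw [add_assoc, ← hsr, hcf, show (((K.toNat + 1 : Nat)) : Int) = K + 1 from by omega]
        rw [htot]
    · -- dr = -1, dc = -1
      simp only [if_true, if_false, if_neg (show ¬((-1:Int) = 1) from by norm_num), if_neg (show ¬((-1:Int) + -1 = 0) from by norm_num), if_neg (show ¬((-1:Int) + -1 = 2) from by norm_num), neg_neg]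
      set K : Int := if r < c then r else c with hK
      have hK1 : K ≤ r := by rw [hK]; split_ifs <;> omega
      have hK2 : K ≤ c := by rw [hK]; split_ifs <;> omega
      have hK0 : 0 ≤ K := by rw [hK]; split_ifs <;> omega
      have hKc : ((K.toNat : Int)) = K := Int.toNat_of_nonneg hK0
      by_cases hf : rem < K.toNat + 1
      · rw [if_pos hf]
        have hA := loopA_straight N M (bounceMat N M) (mat_get N M) rem 0 total r c (-1) (-1)
          (by norm_num) (by norm_num) hr0 hrN hc0 hcM
          (by intro h; omega) (by intro h; omega) (by intro h; omega) (by intro h; omega)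
        rw [Nat.add_zero] at hA
        rw [hA, loopA_zero N M _ _ _ _ _ _ ⟨by omega, by omega, by omega, by omega⟩]
      · rw [if_neg hf]
        have hA := loopA_straight N M (bounceMat N M) (mat_get N M) K.toNat (rem - K.toNat)
          total r c (-1) (-1) (by norm_num) (by norm_num) hr0 hrN hc0 hcM
          (by intro h; omega) (by intro h; omega) (by intro h; omega) (by intro h; omega)
        rw [show K.toNat + (rem - K.toNat) = rem from by omega] at hA
        obtain ⟨f2, hf2⟩ : ∃ f2, rem - K.toNat = f2 + 1 := ⟨rem - K.toNat - 1, by omega⟩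
        rw [hA, hf2, loopA_succ N M _ _ _ _ _ _ _ ⟨by omega, by omega, by omega, by omega⟩,
            mat_get N M _ _ (by omega) (by omega) (by omega) (by omega),
            ihg f2 _ _ _ _ _ (by omega) (by split_ifs <;> simp) (by split_ifs <;> simp)]
        simp only [hKc, neg_neg]
        rw [show f2 = rem - (K.toNat + 1) from by omega]
        have hsr := segSum_succ_right (-1) (-1) K.toNat r c
        simp only [hKc] at hsr
        have hKe : (K + 1).toNat = K.toNat + 1 := by omega
        have hcf := segSum_cfm2 (K.toNat + 1) r c (by omega) (by omega)
        rw [show r + c - 2 * (((K.toNat + 1 : Nat)) : Int) + 2 = r + c - 2 * K from by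
          push_cast; omega] at hcf
        have hfd : PySem.Int.floordiv (2 ^ (r + c - 2 * K).toNat * (4 ^ (K + 1).toNat - 1)) 3
            = 2 ^ (r + c - 2 * K).toNat * (4 ^ (K + 1).toNat - 1) / 3 :=
          PySem.Int.floordiv_eq_ediv_of_pos (by norm_num)
        have htot : total + segSum r c (-1) (-1) K.toNat + 2 ^ (r + -1 * K + (c + -1 * K)).toNat
            = total + PySem.Int.floordiv (2 ^ (r + c - 2 * K).toNat * (4 ^ (K + 1).toNat - 1)) 3 := by
          rw [hfd, add_assoc, ← hsr, hKe, ← hcf, Int.mul_ediv_cancel_left _ (by norm_num)]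
        rw [htot]
  · rw [bounceLoopA.eq_def, bounceLoopB, if_neg hin, if_neg hin]

-- ===== VERDICT (by name: the statement is the Claim_ definition above) =====
theorem bounce_spec : Claim_equal_bounce := by
  intro N M _
  unfold Spec_bounce bounce bounce_alt
  exact loopAB N M _ _ 0 0 0 1 1 (le_refl _) (Or.inl rfl) (Or.inl rfl)
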